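-- pv_equiv track=rewrite | github.com/minhluan96/leetcode-practice | leetcode/src/bigocoding/sorting/gukiz_and_contest.py | gukizAndContest
-- ===== SOURCE A (Python) =====
-- def gukizAndContest(n, students):
--     sortedStudents = sorted(students, reverse=True)
--
--     results = []
--     resultsMap = {}
--     currentScore = students[0]
--     higherPos = len(results)
--
--     for i in range(n):
--         if sortedStudents[i] != currentScore:
--             currentScore = sortedStudents[i]
--             higherPos = len(results)
--
--         results.append(1 + higherPos)
--         resultsMap[sortedStudents[i]] = 1 + higherPos
--
--     results = []
--     for i in range(n):
--         results.append(resultsMap[students[i]])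
--
--     return results
-- ===== SOURCE B (Python) =====
-- def gukizAndContest(n, students):
--     # rank of a student = 1 + number of students with a strictly greater score
--     return [1 + sum(1 for y in students if y > students[i]) for i in range(n)]
-- ===== Notes on version B (the rewrite author's own statement) =====
-- stated objective: simpler
-- what changed: Drops the sort, the rank-assignment loop and the score-to-rank dict entirely: each rank is computed directly as 1 + the number of strictly greater scores, by a single comprehension with an inner count.
import Mathlib
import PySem

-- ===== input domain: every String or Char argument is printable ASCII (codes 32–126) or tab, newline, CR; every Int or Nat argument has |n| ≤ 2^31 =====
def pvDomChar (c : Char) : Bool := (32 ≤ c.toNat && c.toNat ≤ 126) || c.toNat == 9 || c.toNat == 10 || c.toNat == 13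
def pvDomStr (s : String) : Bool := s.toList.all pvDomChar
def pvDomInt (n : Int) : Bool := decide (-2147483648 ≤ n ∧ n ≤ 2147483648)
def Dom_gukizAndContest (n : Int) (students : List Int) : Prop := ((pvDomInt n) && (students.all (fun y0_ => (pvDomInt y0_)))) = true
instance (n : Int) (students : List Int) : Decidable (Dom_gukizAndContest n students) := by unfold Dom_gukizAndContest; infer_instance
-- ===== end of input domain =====

-- B drops A's sort and the score→rank dict: each rank is computed directly as 1 + the
-- count of strictly greater scores (objective: simpler; not faster).

-- ===== PORT A =====
-- the body of A's first for-loop (state: results, resultsMap, currentScore, higherPos)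
def stepA (sortedStudents : List Int) (st : List Int × PySem.Dict Int Int × Int × Int) (i : Int) :
    List Int × PySem.Dict Int Int × Int × Int :=
  let results := st.1
  let resultsMap := st.2.1
  let currentScore := st.2.2.1
  let higherPos := st.2.2.2
  let v := PySem.List.pyGetD sortedStudents i 0
  let p : Int × Int := if v ≠ currentScore then (v, (results.length : Int)) else (currentScore, higherPos)
  (results ++ [1 + p.2], resultsMap.insert v (1 + p.2), p.1, p.2)

def gukizAndContest (n : Int) (students : List Int) : List Int :=
  let sortedStudents := PySem.List.sorted students (fun x => x) true
  -- currentScore = students[0] (the IndexError on empty input is excluded by Pre_)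
  let st := (PySem.List.pyRange 0 n 1).foldl (stepA sortedStudents)
    ([], PySem.Dict.empty, PySem.List.pyGetD students 0 0, 0)
  -- second loop: results.append(resultsMap[students[i]]) (KeyError excluded by Pre_)
  (PySem.List.pyRange 0 n 1).foldl
    (fun results i => results ++ [st.2.1.getD (PySem.List.pyGetD students i 0) 0]) []

-- ===== PORT B =====
def gukizAndContest_alt (n : Int) (students : List Int) : List Int :=
  (PySem.List.pyRange 0 n 1).map
    (fun i => 1 + (students.countP (fun y => decide (PySem.List.pyGetD students i 0 < y)) : Int))

-- ===== PRECONDITION & SPEC =====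
-- Pre_ is exactly the set of inputs on which A returns: students nonempty, n ≤ len(students)
-- (else IndexError on students[0] / sortedStudents[i]), and each of the first n students
-- among the n highest scores (else KeyError: the dict only holds the top-n scores).
def Pre_gukizAndContest (n : Int) (students : List Int) : Prop :=
  students ≠ [] ∧ n ≤ (students.length : Int) ∧
    ∀ i : Nat, i < n.toNat → (students.countP (fun y => decide (students.getD i 0 < y)) : Int) < n
instance (n : Int) (students : List Int) : Decidable (Pre_gukizAndContest n students) := by
  unfold Pre_gukizAndContest; infer_instance
def pvWitness_gukizAndContest : Int × List Int := (3, [2, 1, 2])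

def Spec_gukizAndContest (n : Int) (students : List Int) (out : List Int) : Prop := out = gukizAndContest_alt n students
instance (n : Int) (students : List Int) (out : List Int) : Decidable (Spec_gukizAndContest n students out) := by unfold Spec_gukizAndContest; infer_instance

-- ===== CLAIM (what is proved, stated in full; the proofs are below) =====
def Claim_equal_gukizAndContest : Prop := ∀ (n : Int) (students : List Int), Dom_gukizAndContest n students → Pre_gukizAndContest n students → Spec_gukizAndContest n students (gukizAndContest n students)
-- ===== LEMMAS AND PROOFS =====

lemma getD_mem_of_lt (l : List Int) (j : Nat) (h : j < l.length) : l.getD j 0 ∈ l := by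
  rw [List.getD_eq_getElem?_getD, List.getElem?_eq_getElem h]
  exact List.getElem_mem h

-- On a descending list s, the elements strictly greater than v form exactly an initial
-- segment of length countP (v < ·): index j holds a value > v iff j < that count.
lemma count_threshold (v : Int) :
    ∀ (s : List Int), s.Pairwise (fun a b => b ≤ a) →
      ∀ j : Nat, j < s.length →
        (v < s.getD j 0 ↔ j < s.countP (fun y => decide (v < y))) := by
  intro s
  induction s with
  | nil => intro _ j hj; simp at hj
  | cons a t ih =>
    intro hpw j hj
    obtain ⟨ha, ht⟩ := List.pairwise_cons.mp hpw
    by_cases hva : v < a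
    · rw [List.countP_cons, if_pos (by simpa using hva)]
      cases j with
      | zero =>
        rw [List.getD_cons_zero]
        constructor
        · intro _; omega
        · intro _; exact hva
      | succ j' =>
        have hj' : j' < t.length := by simpa using hj
        rw [List.getD_cons_succ, ih ht j' hj']
        omega
    · have ht0 : t.countP (fun y => decide (v < y)) = 0 := by
        rw [List.countP_eq_zero]
        intro b hb
        have hba : b ≤ a := ha b hb
        simp only [decide_eq_true_eq]
        omega
      rw [List.countP_cons, if_neg (by simpa using hva), ht0]
      cases j with
      | zero =>
        rw [List.getD_cons_zero]
        constructor
        · intro h; exact absurd h hva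
        · intro h; omega
      | succ j' =>
        have hj' : j' < t.length := by simpa using hj
        have hb : t.getD j' 0 ≤ a := ha _ (getD_mem_of_lt t j' hj')
        rw [List.getD_cons_succ]
        constructor
        · intro h; omega
        · intro h; omega

lemma desc_monotone (s : List Int) (hpw : s.Pairwise (fun a b => b ≤ a))
    (i j : Nat) (hij : i ≤ j) (hj : j < s.length) : s.getD j 0 ≤ s.getD i 0 := by
  rcases Nat.eq_or_lt_of_le hij with h | h
  · subst h; exact le_refl _
  · have := (List.pairwise_iff_getElem).mp hpw i j (by omega) hj h
    rw [List.getD_eq_getElem?_getD, List.getElem?_eq_getElem hj,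
        List.getD_eq_getElem?_getD, List.getElem?_eq_getElem (by omega : i < s.length)]
    simpa using this

-- first-occurrence count: if everything before index k is strictly greater than s[k],
-- the number of elements strictly greater than s[k] is exactly k
lemma count_first (s : List Int) (hpw : s.Pairwise (fun a b => b ≤ a))
    (k : Nat) (hk : k < s.length)
    (hfirst : ∀ j : Nat, j < k → s.getD k 0 < s.getD j 0) :
    s.countP (fun y => decide (s.getD k 0 < y)) = k := by
  have hle : ¬ (s.getD k 0 < s.getD k 0) := by omega
  have h1 := count_threshold (s.getD k 0) s hpw k hk
  rcases Nat.eq_zero_or_pos k with h0 | hpos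
  · omega
  · have h2 := count_threshold (s.getD k 0) s hpw (k - 1) (by omega)
    have h3 : s.getD k 0 < s.getD (k - 1) 0 := hfirst (k - 1) (by omega)
    omega

-- the first occurrence of v in a descending list sits at index countP (v < ·)
lemma getD_count (s : List Int) (hpw : s.Pairwise (fun a b => b ≤ a))
    (v : Int) (hv : v ∈ s) :
    s.countP (fun y => decide (v < y)) < s.length ∧
      s.getD (s.countP (fun y => decide (v < y))) 0 = v := by
  obtain ⟨i, hi, hvi⟩ := List.getElem_of_mem hv
  have hvi' : s.getD i 0 = v := by
    rw [List.getD_eq_getElem?_getD, List.getElem?_eq_getElem hi]; simpa using hvi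
  have hci : s.countP (fun y => decide (v < y)) ≤ i := by
    have := count_threshold v s hpw i hi
    rw [hvi'] at this
    omega
  have hcl : s.countP (fun y => decide (v < y)) < s.length := by omega
  have h1 := count_threshold v s hpw (s.countP (fun y => decide (v < y))) hcl
  have h2 := desc_monotone s hpw (s.countP (fun y => decide (v < y))) i hci hi
  rw [hvi'] at h2
  exact ⟨hcl, by omega⟩

-- loop invariant of A's first loop after k iterations
lemma invA (students s : List Int) (hpw : s.Pairwise (fun a b => b ≤ a))
    (k : Nat) (hk : k ≤ s.length) :
    (((List.range k).map (fun j : Nat => (j : Int))).foldl (stepA s)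
        ([], PySem.Dict.empty, PySem.List.pyGetD students 0 0, 0)).1.length = k ∧
    (∀ v : Int,
      (((List.range k).map (fun j : Nat => (j : Int))).foldl (stepA s)
        ([], PySem.Dict.empty, PySem.List.pyGetD students 0 0, 0)).2.1.getD v 0 =
        if v ∈ s.take k then 1 + (s.countP (fun y => decide (v < y)) : Int) else 0) ∧
    (0 < k →
      (((List.range k).map (fun j : Nat => (j : Int))).foldl (stepA s)
        ([], PySem.Dict.empty, PySem.List.pyGetD students 0 0, 0)).2.2.1 = s.getD (k - 1) 0 ∧
      (((List.range k).map (fun j : Nat => (j : Int))).foldl (stepA s)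
        ([], PySem.Dict.empty, PySem.List.pyGetD students 0 0, 0)).2.2.2 =
        (s.countP (fun y => decide (s.getD (k - 1) 0 < y)) : Int)) := by
  induction k with
  | zero => simp
  | succ k ih =>
    have hk' : k ≤ s.length := by omega
    have hkl : k < s.length := by omega
    obtain ⟨ihlen, ihmap, ihcs⟩ := ih hk'
    rw [List.range_succ, List.map_append, List.foldl_append]
    set st := ((List.range k).map (fun j : Nat => (j : Int))).foldl (stepA s)
      ([], PySem.Dict.empty, PySem.List.pyGetD students 0 0, 0) with hst
    have hv : PySem.List.pyGetD s ((k : Nat) : Int) 0 = s.getD k 0 := by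
      simp [PySem.List.pyGetD_natCast]
    -- the pair (currentScore, higherPos) chosen by this iteration is (s[k], countP (s[k] < ·))
    have hcnt : (if PySem.List.pyGetD s ((k : Nat) : Int) 0 ≠ st.2.2.1
          then (PySem.List.pyGetD s ((k : Nat) : Int) 0, (st.1.length : Int))
          else (st.2.2.1, st.2.2.2)) =
        (s.getD k 0, (s.countP (fun y => decide (s.getD k 0 < y)) : Int)) := by
      rcases Nat.eq_zero_or_pos k with h0 | hpos
      · subst h0
        simp only [List.range_zero, List.map_nil, List.foldl_nil] at hst
        have hc0 : s.countP (fun y => decide (s.getD 0 0 < y)) = 0 :=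
          count_first s hpw 0 hkl (by omega)
        have hv0 : PySem.List.pyGetD s 0 0 = s[0]?.getD 0 := by
          simpa [List.getD_eq_getElem?_getD] using hv
        have hc0' : s.countP (fun y => decide (s[0]?.getD 0 < y)) = 0 := by
          simpa [List.getD_eq_getElem?_getD] using hc0
        rw [hst]
        split_ifs with h
        · simp [hv0, hc0']
        · push_neg at h
          have h' : s[0]?.getD 0 = PySem.List.pyGetD students 0 0 := by
            simpa [hv0] using h
          simp [hc0', ← h']
      · obtain ⟨hcs, hhp⟩ := ihcs hpos
        split_ifs with h
        · have hne' : s.getD k 0 ≠ s.getD (k - 1) 0 := by rw [hv, hcs] at h; exact h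
          have hmono := desc_monotone s hpw (k - 1) k (by omega) hkl
          have hlt : s.getD k 0 < s.getD (k - 1) 0 := by omega
          have hcf : s.countP (fun y => decide (s.getD k 0 < y)) = k := by
            apply count_first s hpw k hkl
            intro j hj
            have := desc_monotone s hpw j (k - 1) (by omega) (by omega)
            omega
          rw [hv, ihlen, hcf]
        · push_neg at h
          rw [hv, hcs] at h
          rw [hcs, hhp, h]
    simp only [List.map_cons, List.map_nil, List.foldl_cons, List.foldl_nil, stepA]
    rw [hcnt, hv]
    refine ⟨by simp [ihlen], ?_, ?_⟩
    · intro v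
      simp only
      rw [PySem.Dict.getD_insert]
      have hgetk : s.getD k 0 = s[k] := by
        rw [List.getD_eq_getElem?_getD, List.getElem?_eq_getElem hkl]; rfl
      have htake : s.take (k + 1) = s.take k ++ [s[k]] := by
        rw [List.take_succ, List.getElem?_eq_getElem hkl]
        rfl
      by_cases hvk : v = s.getD k 0
      · rw [if_pos hvk, htake]
        have hmem : v ∈ List.take k s ++ [s[k]] := by
          rw [hvk, hgetk]
          exact List.mem_append_right _ (List.mem_singleton_self _)
        rw [if_pos hmem, hvk]
      · rw [if_neg hvk, ihmap v, htake]
        have hmem : v ∈ s.take k ++ [s[k]] ↔ v ∈ s.take k := by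
          simp only [List.mem_append, List.mem_singleton]
          constructor
          · rintro (h | h)
            · exact h
            · exact absurd (h.trans hgetk.symm) hvk
          · exact Or.inl
        simp only [hmem]
    · intro _
      simp

-- after the full first loop the dict maps each admissible score to its rank
lemma lookup_rank (students s : List Int) (hperm : s.Perm students)
    (hpw : s.Pairwise (fun a b => b ≤ a)) (m : Nat) (hm : m ≤ s.length)
    (v : Int) (hvmem : v ∈ students)
    (hc : students.countP (fun y => decide (v < y)) < m) :
    (((List.range m).map (fun j : Nat => (j : Int))).foldl (stepA s)
        ([], PySem.Dict.empty, PySem.List.pyGetD students 0 0, 0)).2.1.getD v 0 =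
      1 + (students.countP (fun y => decide (v < y)) : Int) := by
  obtain ⟨-, hmap, -⟩ := invA students s hpw m hm
  have hcnt_eq : s.countP (fun y => decide (v < y)) = students.countP (fun y => decide (v < y)) :=
    hperm.countP_eq _
  have hvs : v ∈ s := (hperm.mem_iff).mpr hvmem
  obtain ⟨hcl, hgc⟩ := getD_count s hpw v hvs
  have hcm : s.countP (fun y => decide (v < y)) < m := by omega
  have hvtake : v ∈ s.take m := by
    rw [← hgc]
    have h1 : s.countP (fun y => decide (v < y)) < (s.take m).length := by
      rw [List.length_take]; omega
    have h2 : (s.take m).getD (s.countP (fun y => decide (v < y))) 0 =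
        s.getD (s.countP (fun y => decide (v < y))) 0 := by
      rw [List.getD_eq_getElem?_getD, List.getD_eq_getElem?_getD,
          List.getElem?_take_of_lt hcm]
    rw [← h2]
    exact getD_mem_of_lt _ _ h1
  rw [hmap v, if_pos hvtake, hcnt_eq]

-- ===== VERDICT (by name: the statement is the Claim_ definition above) =====
theorem gukizAndContest_spec : Claim_equal_gukizAndContest := by
  intro n students _ hpre
  obtain ⟨hne, hlen, hcnt⟩ := hpre
  unfold Spec_gukizAndContest gukizAndContest gukizAndContest_alt
  by_cases hn : n ≤ 0
  · rw [PySem.List.pyRange_one_eq_nil hn]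
    simp
  · push_neg at hn
    have hrange : PySem.List.pyRange 0 n 1 = (List.range n.toNat).map (fun j : Nat => (j : Int)) := by
      rw [PySem.List.pyRange_one 0 n]
      simp
    rw [hrange]
    have hperm : (PySem.List.sorted students (fun x => x) true).Perm students :=
      PySem.List.sorted_perm students (fun x => x) true
    have hpw : (PySem.List.sorted students (fun x => x) true).Pairwise (fun a b => b ≤ a) := by
      have := PySem.List.sorted_pairwise_rev students (fun x => x)
      simpa using this
    have hm : n.toNat ≤ (PySem.List.sorted students (fun x => x) true).length := by
      rw [PySem.List.length_sorted]
      omega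
    rw [PySem.List.foldl_append_singleton_eq_map]
    apply List.map_congr_left
    intro i hi
    obtain ⟨j, hj, rfl⟩ := List.mem_map.mp hi
    have hjm : j < n.toNat := List.mem_range.mp hj
    have hjlen : j < students.length := by omega
    have hpg : PySem.List.pyGetD students ((j : Nat) : Int) 0 = students.getD j 0 := by
      simp [PySem.List.pyGetD_natCast]
    rw [hpg]
    have hc := hcnt j hjm
    exact lookup_rank students _ hperm hpw n.toNat hm (students.getD j 0)
      (getD_mem_of_lt students j hjlen) (by omega)
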